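-- pv_equiv track=rewrite | github.com/ghekierejulie-ux/test1 | PythonProject/EXAMEN/1zigzag1.py | iszigzag
-- ===== SOURCE A (Python) =====
-- def iszigzag(lijst):
--     for i in range(len(lijst)-1):
--         if i%2 == 0:
--             if lijst[i] < lijst[i+1]:
--                 return False
--             else:
--                 if lijst[i] > lijst[i+1]:
--                     return False
--
--     return True
-- ===== SOURCE B (Python) =====
-- def iszigzag(lijst):
--     k = len(lijst) // 2
--     return lijst[:2*k:2] == lijst[1::2]
-- ===== Notes on version B (the rewrite author's own statement) =====
-- stated objective: idiomatic
-- what changed: Replaced A's index loop with parity test and early returns by a loop-free formulation: build the even-index elements (truncated to the number of pairs) and the odd-index elements as two strided slices and compare the slices for list equality.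
import Mathlib
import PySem

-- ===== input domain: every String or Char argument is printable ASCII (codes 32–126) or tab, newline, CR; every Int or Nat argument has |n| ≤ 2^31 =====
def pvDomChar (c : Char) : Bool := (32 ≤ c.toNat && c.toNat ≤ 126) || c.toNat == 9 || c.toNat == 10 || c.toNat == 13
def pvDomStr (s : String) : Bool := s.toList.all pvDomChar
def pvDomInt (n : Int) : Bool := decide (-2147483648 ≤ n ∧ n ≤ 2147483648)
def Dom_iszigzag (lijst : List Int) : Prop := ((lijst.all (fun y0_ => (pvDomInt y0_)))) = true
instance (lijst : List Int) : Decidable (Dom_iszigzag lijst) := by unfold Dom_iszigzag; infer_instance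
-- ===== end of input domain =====

-- B replaces A's index loop (range(len-1), parity test, early returns) by a loop-free
-- comparison of two strided slices (even-index elements vs odd-index elements); same cost.


-- ===== PORT A =====
-- the 'for i in range(len(lijst)-1)' loop body, step by step over the remaining indices
def iszigzagGo (lijst : List Int) : List Int → Bool
  | [] => true
  | i :: rest =>
    if PySem.Int.mod i 2 == 0 then
      if PySem.List.pyGetD lijst i 0 < PySem.List.pyGetD lijst (i + 1) 0 then false
      else
        if PySem.List.pyGetD lijst i 0 > PySem.List.pyGetD lijst (i + 1) 0 then false
        else iszigzagGo lijst rest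
    else iszigzagGo lijst rest

def iszigzag (lijst : List Int) : Bool :=
  iszigzagGo lijst (PySem.List.pyRange 0 ((lijst.length : Int) - 1) 1)

-- ===== PORT B =====
-- Source B:  k = len(lijst) // 2 ;  return lijst[:2*k:2] == lijst[1::2]
-- slices with step 2 are PySem.List.slice?; step ≠ 0 so they always return some (.getD [] only totalizes)
def iszigzag_alt (lijst : List Int) : Bool :=
  let k : Int := PySem.Int.floordiv (lijst.length : Int) 2
  ((PySem.List.slice? lijst none (some (2 * k)) 2).getD [])
    == ((PySem.List.slice? lijst (some 1) none 2).getD [])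

-- ===== PRECONDITION & SPEC =====
def Spec_iszigzag (lijst : List Int) (out : Bool) : Prop := out = iszigzag_alt lijst
instance (lijst : List Int) (out : Bool) : Decidable (Spec_iszigzag lijst out) := by unfold Spec_iszigzag; infer_instance

-- ===== CLAIM (what is proved, stated in full; the proofs are below) =====
def Claim_equal_iszigzag : Prop := ∀ (lijst : List Int), Dom_iszigzag lijst → Spec_iszigzag lijst (iszigzag lijst)

-- ===== LEMMAS AND PROOFS =====

-- proof-side recursion both programs are reduced to: consecutive non-overlapping pairs are equal
def pairEq : List Int → Bool
  | a :: b :: rest => (a == b) && pairEq rest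
  | _ => true

-- dropping two leading elements shifts A's loop indices by two (parity preserved)
lemma iszigzagGo_shift (xs : List Int) (a b : Int) :
    ∀ (m k : Nat), xs.length - k ≤ m →
      iszigzagGo (a :: b :: xs) (PySem.List.pyRange ((k : Int) + 2) ((xs.length : Int) + 1) 1)
        = iszigzagGo xs (PySem.List.pyRange (k : Int) ((xs.length : Int) - 1) 1) := by
  intro m
  induction m with
  | zero =>
    intro k hk
    have h1 : ((xs.length : Int) + 1) ≤ (k : Int) + 2 := by omega
    have h2 : ((xs.length : Int) - 1) ≤ (k : Int) := by omega
    rw [PySem.List.pyRange_one_eq_nil h1, PySem.List.pyRange_one_eq_nil h2]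
    rfl
  | succ m ih =>
    intro k hk
    by_cases hlt : (k : Int) < (xs.length : Int) - 1
    · have h1 : (k : Int) + 2 < (xs.length : Int) + 1 := by omega
      rw [PySem.List.pyRange_one_cons h1, PySem.List.pyRange_one_cons hlt]
      have hk2 : (k : Int) + 2 = ((k + 2 : Nat) : Int) := by push_cast; ring
      have hk3 : (k : Int) + 2 + 1 = ((k + 3 : Nat) : Int) := by push_cast; ring
      have hk1 : (k : Int) + 1 = ((k + 1 : Nat) : Int) := by push_cast; ring
      have hmod : PySem.Int.mod ((k : Int) + 2) 2 = PySem.Int.mod (k : Int) 2 := by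
        rw [PySem.Int.mod_eq_emod_of_pos (by norm_num : (0:Int) < 2),
            PySem.Int.mod_eq_emod_of_pos (by norm_num : (0:Int) < 2)]
        omega
      have hg1 : PySem.List.pyGetD (a :: b :: xs) ((k : Int) + 2) 0
          = PySem.List.pyGetD xs (k : Int) 0 := by
        rw [hk2, PySem.List.pyGetD_natCast, PySem.List.pyGetD_natCast]
        rfl
      have hg2 : PySem.List.pyGetD (a :: b :: xs) ((k : Int) + 2 + 1) 0
          = PySem.List.pyGetD xs ((k : Int) + 1) 0 := by
        rw [hk3, hk1, PySem.List.pyGetD_natCast, PySem.List.pyGetD_natCast]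
        rfl
      have ih' := ih (k + 1) (by omega)
      simp only [iszigzagGo, hmod, hg1, hg2]
      rw [show ((k : Int) + 2 + 1) = (((k + 1 : Nat) : Int) + 2) by push_cast; ring, hk1]
      rw [ih']
    · have h1 : ((xs.length : Int) + 1) ≤ (k : Int) + 2 := by omega
      have h2 : ((xs.length : Int) - 1) ≤ (k : Int) := by omega
      rw [PySem.List.pyRange_one_eq_nil h1, PySem.List.pyRange_one_eq_nil h2]
      rfl

-- index 1 is odd, so A's loop skips it and continues at index 2
lemma iszigzagGo_tail (xs : List Int) (a b : Int) :
    iszigzagGo (a :: b :: xs) (PySem.List.pyRange 1 ((xs.length : Int) + 1) 1)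
      = iszigzag xs := by
  unfold iszigzag
  cases xs with
  | nil =>
    rw [PySem.List.pyRange_one_eq_nil (by norm_num), PySem.List.pyRange_one_eq_nil (by norm_num)]
    rfl
  | cons c t =>
    have h1 : (1 : Int) < ((c :: t).length : Int) + 1 := by
      simp only [List.length_cons]; push_cast; omega
    rw [PySem.List.pyRange_one_cons h1]
    have hmod : (PySem.Int.mod 1 2 == 0) = false := by decide
    simp only [iszigzagGo, hmod, Bool.false_eq_true, if_false]
    have := iszigzagGo_shift (c :: t) a b (c :: t).length 0 (by omega)
    simp only [List.length_cons] at this ⊢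
    convert this using 3

-- A computes exactly the non-overlapping-pair recursion
lemma iszigzag_eq_pairEq : ∀ (n : Nat) (xs : List Int), xs.length ≤ n →
    iszigzag xs = pairEq xs := by
  intro n
  induction n with
  | zero =>
    intro xs h
    have : xs = [] := List.eq_nil_of_length_eq_zero (by omega)
    subst this
    decide
  | succ n ih =>
    intro xs h
    match xs with
    | [] => decide
    | [a] =>
      simp only [iszigzag, pairEq]
      rw [show ((([a] : List Int).length : Int) - 1) = 0 by simp]
      rw [PySem.List.pyRange_one_eq_nil (by norm_num)]
      rfl
    | a :: b :: t =>
      have hlen : ((a :: b :: t).length : Int) - 1 = (t.length : Int) + 1 := by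
        simp only [List.length_cons]; push_cast; ring
      unfold iszigzag
      rw [hlen, PySem.List.pyRange_one_cons (by omega)]
      have hmod : (PySem.Int.mod 0 2 == 0) = true := by decide
      have hg1 : PySem.List.pyGetD (a :: b :: t) 0 0 = a := by
        simp [PySem.List.pyGetD_zero_cons]
      have hg2 : PySem.List.pyGetD (a :: b :: t) (0 + 1) 0 = b := by
        rw [show ((0 : Int) + 1) = ((1 : Nat) : Int) by norm_num, PySem.List.pyGetD_natCast]
        rfl
      simp only [iszigzagGo, hmod, if_true, hg1, hg2]
      rw [show (0 : Int) + 1 = 1 by ring]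
      rw [iszigzagGo_tail t a b]
      have ht : iszigzag t = pairEq t := ih t (by simp at h ⊢; omega)
      by_cases hab : a < b
      · simp only [pairEq, hab, if_true]
        have : (a == b) = false := by simp; omega
        simp [this]
      · by_cases hba : a > b
        · simp only [pairEq, hab, hba, if_false, if_true]
          have : (a == b) = false := by simp; omega
          simp [this]
        · have hab' : a = b := by omega
          subst hab'
          simp only [pairEq, lt_irrefl, if_false]
          simp [ht]

-- pairEq is pointwise equality of the even- and odd-index elements, pair by pair
lemma pairEq_iff : ∀ (n : Nat) (xs : List Int), xs.length ≤ n →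
    (pairEq xs = true ↔ ∀ j < xs.length / 2, xs.getD (2*j) 0 = xs.getD (2*j+1) 0) := by
  intro n
  induction n with
  | zero =>
    intro xs h
    have : xs = [] := List.eq_nil_of_length_eq_zero (by omega)
    subst this
    simp [pairEq]
  | succ n ih =>
    intro xs h
    match xs with
    | [] => simp [pairEq]
    | [a] => simp [pairEq]
    | a :: b :: t =>
      have ht := ih t (by simp at h ⊢; omega)
      have hlen : (a :: b :: t).length / 2 = t.length / 2 + 1 := by
        simp only [List.length_cons]; omega
      simp only [pairEq, Bool.and_eq_true, beq_iff_eq, ht, hlen]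
      constructor
      · rintro ⟨hab, hrest⟩ j hj
        cases j with
        | zero => simpa using hab
        | succ j =>
          have h1 : (a :: b :: t).getD (2*(j+1)) 0 = t.getD (2*j) 0 := by
            rw [show 2*(j+1) = 2*j+1+1 from by omega, List.getD_cons_succ, List.getD_cons_succ]
          have h2 : (a :: b :: t).getD (2*(j+1)+1) 0 = t.getD (2*j+1) 0 := by
            rw [show 2*(j+1)+1 = (2*j+1)+1+1 from by omega, List.getD_cons_succ, List.getD_cons_succ]
          rw [h1, h2]
          exact hrest j (by omega)
      · intro hall
        refine ⟨by simpa using hall 0 (by omega), fun j hj => ?_⟩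
        have h1 : (a :: b :: t).getD (2*(j+1)) 0 = t.getD (2*j) 0 := by
          rw [show 2*(j+1) = 2*j+1+1 from by omega, List.getD_cons_succ, List.getD_cons_succ]
        have h2 : (a :: b :: t).getD (2*(j+1)+1) 0 = t.getD (2*j+1) 0 := by
          rw [show 2*(j+1)+1 = (2*j+1)+1+1 from by omega, List.getD_cons_succ, List.getD_cons_succ]
        have := hall (j+1) (by omega)
        rwa [h1, h2] at this

-- closed form of the truncated even-index slice  lijst[:2*(n//2):2]
lemma evens_closed (xs : List Int) :
    (PySem.List.slice? xs none (some (2 * PySem.Int.floordiv (xs.length : Int) 2)) 2).getD []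
      = (List.range (xs.length / 2)).map (fun j => xs.getD (2*j) 0) := by
  have hk : PySem.Int.floordiv ((xs.length : Nat) : Int) 2 = ((xs.length / 2 : Nat) : Int) := by
    rw [PySem.Int.floordiv_eq_ediv_of_pos (by norm_num)]; omega
  rw [hk]
  unfold PySem.List.slice? PySem.List.sliceIndices
  simp only [if_neg (by norm_num : ¬ (2:Int) = 0), if_neg (by norm_num : ¬ (2:Int) < 0)]
  set n := xs.length with hn
  have hstop : ((2 * ((n / 2 : Nat) : Int)) < 0) = False := by simp; positivity
  simp only [hstop, if_false]
  have hmin : min (2 * ((n / 2 : Nat) : Int)) (n : Int) = 2 * ((n/2 : Nat) : Int) := by omega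
  have hcount : (if 0 < (2:Int) then if 0 < min (2 * ((n/2:Nat):Int)) (n:Int) then ((min (2 * ((n/2:Nat):Int)) (n:Int) - 0 + 2 - 1) / 2).toNat else 0
              else if min (2 * ((n/2:Nat):Int)) (n:Int) < 0 then ((0 - min (2 * ((n/2:Nat):Int)) (n:Int) + -2 - 1) / -2).toNat else 0) = n / 2 := by
    rw [hmin]; split_ifs with h1 h2 <;> omega
  rw [hcount, Option.getD_some]
  rw [List.filterMap_congr (g := fun x => some (xs.getD (2*x) 0)) ?_]
  · simp
  · intro x hx
    have hx' : x < n / 2 := List.mem_range.mp hx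
    have hlt : 2 * x < n := by omega
    have : ((0 : Int) + 2 * (x : Int)).toNat = 2 * x := by omega
    rw [this]
    simp [List.getD, List.getElem?_eq_getElem (show 2*x < xs.length by omega)]

-- closed form of the odd-index slice  lijst[1::2]
lemma odds_closed (xs : List Int) :
    (PySem.List.slice? xs (some 1) none 2).getD []
      = (List.range (xs.length / 2)).map (fun j => xs.getD (2*j+1) 0) := by
  unfold PySem.List.slice? PySem.List.sliceIndices
  simp only [if_neg (by norm_num : ¬ (2:Int) = 0), if_neg (by norm_num : ¬ (2:Int) < 0),
    if_neg (by norm_num : ¬ (1:Int) < 0)]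
  set n := xs.length with hn
  have hcount : (if 0 < (2:Int) then if min (1:Int) (n:Int) < (n:Int) then (((n:Int) - min 1 (n:Int) + 2 - 1) / 2).toNat else 0
              else if (n:Int) < min (1:Int) (n:Int) then ((min (1:Int) (n:Int) - (n:Int) + -2 - 1) / -2).toNat else 0) = n / 2 := by
    split_ifs with h1 h2 <;> omega
  rw [hcount, Option.getD_some]
  rw [List.filterMap_congr (g := fun x => some (xs.getD (2*x+1) 0)) ?_]
  · simp
  · intro x hx
    have hx' : x < n / 2 := List.mem_range.mp hx
    have hone : min (1:Int) (n:Int) = 1 := by omega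
    have : (min (1:Int) (n:Int) + 2 * (x : Int)).toNat = 2 * x + 1 := by omega
    rw [this]
    simp [List.getD, List.getElem?_eq_getElem (show 2*x+1 < xs.length by omega)]

-- B tests exactly the same pointwise condition
lemma alt_iff (xs : List Int) :
    (iszigzag_alt xs = true ↔ ∀ j < xs.length / 2, xs.getD (2*j) 0 = xs.getD (2*j+1) 0) := by
  have hdef : iszigzag_alt xs
      = (((PySem.List.slice? xs none (some (2 * PySem.Int.floordiv ((xs.length : Nat) : Int) 2)) 2).getD [])
          == ((PySem.List.slice? xs (some 1) none 2).getD [])) := rfl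
  rw [hdef, evens_closed, odds_closed]
  simp only [beq_iff_eq, List.map_inj_left, List.mem_range]

-- ===== VERDICT (by name: the statement is the Claim_ definition above) =====
theorem iszigzag_spec : Claim_equal_iszigzag := by
  intro lijst _
  unfold Spec_iszigzag
  have hA := iszigzag_eq_pairEq lijst.length lijst le_rfl
  have hP := pairEq_iff lijst.length lijst le_rfl
  have hB := alt_iff lijst
  cases hb : iszigzag_alt lijst with
  | true => rw [hA]; rw [hb] at hB; exact hP.mpr (hB.mp rfl)
  | false =>
    rw [hA]
    by_contra hcon
    have : pairEq lijst = true := by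
      cases hpe : pairEq lijst
      · simp [hpe] at hcon
      · rfl
    rw [hB.mpr (hP.mp this)] at hb
    exact absurd hb (by simp)
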